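-- pv_equiv track=rewrite | github.com/sueszli/vector-database-benchmark | dataset/python-mutated/tinys3.py | rgb_color_wheel
-- ===== SOURCE A (Python) =====
-- def rgb_color_wheel(wheel_pos):
--     if False:
--         while True:
--             i = 10
--     'Color wheel to allow for cycling through the rainbow of RGB colors.'
--     wheel_pos = wheel_pos % 255
--     if wheel_pos < 85:
--         return (255 - wheel_pos * 3, 0, wheel_pos * 3)
--     elif wheel_pos < 170:
--         wheel_pos -= 85
--         return (0, wheel_pos * 3, 255 - wheel_pos * 3)
--     else:
--         wheel_pos -= 170
--         return (wheel_pos * 3, 255 - wheel_pos * 3, 0)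
-- ===== SOURCE B (Python) =====
-- def rgb_color_wheel(wheel_pos):
--     'Color wheel to allow for cycling through the rainbow of RGB colors.'
--     w = wheel_pos % 255
--     r = max(0, max(255 - 3 * w, 3 * w - 510))
--     g = max(0, min(3 * w - 255, 765 - 3 * w))
--     b = max(0, min(3 * w, 510 - 3 * w))
--     return (r, g, b)
-- ===== Notes on version B (the rewrite author's own statement) =====
-- stated objective: alternative
-- what changed: Replaces the three-way if/elif segment chain by a branch-free closed form: each RGB channel is computed directly as a clamped triangle wave of the wheel position using only max/min arithmetic, with no segment selection or per-segment subtraction at all.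
import Mathlib
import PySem

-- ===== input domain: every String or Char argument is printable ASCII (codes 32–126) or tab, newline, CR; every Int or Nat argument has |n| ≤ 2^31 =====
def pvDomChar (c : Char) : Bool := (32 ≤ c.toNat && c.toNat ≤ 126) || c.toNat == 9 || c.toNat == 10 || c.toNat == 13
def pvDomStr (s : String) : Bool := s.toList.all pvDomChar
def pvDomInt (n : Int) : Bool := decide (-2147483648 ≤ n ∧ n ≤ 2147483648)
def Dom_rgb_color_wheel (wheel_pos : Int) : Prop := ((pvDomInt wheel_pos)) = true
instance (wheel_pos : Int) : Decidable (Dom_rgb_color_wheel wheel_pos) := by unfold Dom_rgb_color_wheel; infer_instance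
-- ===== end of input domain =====

-- B replaces A's three if/elif segment branches by a branch-free closed form computing each
-- channel as a clamped triangle wave with max/min arithmetic (alternative decomposition, same cost).

-- ===== PORT A =====
def rgb_color_wheel (wheel_pos : Int) : Int × Int × Int :=
  let w := PySem.Int.mod wheel_pos 255
  if w < 85 then (255 - w * 3, 0, w * 3)
  else if w < 170 then
    let w := w - 85
    (0, w * 3, 255 - w * 3)
  else
    let w := w - 170
    (w * 3, 255 - w * 3, 0)

-- ===== PORT B =====
def rgb_color_wheel_alt (wheel_pos : Int) : Int × Int × Int :=
  let w := PySem.Int.mod wheel_pos 255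
  let r := max 0 (max (255 - 3 * w) (3 * w - 510))
  let g := max 0 (min (3 * w - 255) (765 - 3 * w))
  let b := max 0 (min (3 * w) (510 - 3 * w))
  (r, g, b)

-- ===== PRECONDITION & SPEC =====
def Spec_rgb_color_wheel (wheel_pos : Int) (out : Int × Int × Int) : Prop := out = rgb_color_wheel_alt wheel_pos
instance (wheel_pos : Int) (out : Int × Int × Int) : Decidable (Spec_rgb_color_wheel wheel_pos out) := by unfold Spec_rgb_color_wheel; infer_instance

-- ===== CLAIM =====
def Claim_equal_rgb_color_wheel : Prop := ∀ (wheel_pos : Int), Dom_rgb_color_wheel wheel_pos → Spec_rgb_color_wheel wheel_pos (rgb_color_wheel wheel_pos)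

-- ===== LEMMAS AND PROOFS =====

-- the branching body and the clamped-triangle-wave body agree on the canonical residue 0 ≤ w < 255
theorem rgb_bodies_agree (w : Int) (h0 : 0 ≤ w) (h1 : w < 255) :
    (if w < 85 then ((255 - w * 3 : Int), (0 : Int), w * 3)
     else if w < 170 then (0, (w - 85) * 3, 255 - (w - 85) * 3)
     else ((w - 170) * 3, 255 - (w - 170) * 3, 0))
    = (max 0 (max (255 - 3 * w) (3 * w - 510)),
       max 0 (min (3 * w - 255) (765 - 3 * w)),
       max 0 (min (3 * w) (510 - 3 * w))) := by
  by_cases c0 : w < 85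
  · simp only [if_pos c0, Prod.mk.injEq]
    refine ⟨by omega, by omega, by omega⟩
  · by_cases c1 : w < 170
    · simp only [if_neg c0, if_pos c1, Prod.mk.injEq]
      refine ⟨by omega, by omega, by omega⟩
    · simp only [if_neg c0, if_neg c1, Prod.mk.injEq]
      refine ⟨by omega, by omega, by omega⟩

-- ===== VERDICT =====
theorem rgb_color_wheel_spec : Claim_equal_rgb_color_wheel := by
  intro wheel_pos _
  unfold Spec_rgb_color_wheel rgb_color_wheel rgb_color_wheel_alt
  have hm : PySem.Int.mod wheel_pos 255 = wheel_pos % 255 :=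
    PySem.Int.mod_eq_emod_of_pos (by omega)
  have h0 : 0 ≤ wheel_pos % 255 := Int.emod_nonneg _ (by norm_num)
  have h1 : wheel_pos % 255 < 255 := Int.emod_lt_of_pos _ (by norm_num)
  simpa [hm] using rgb_bodies_agree (wheel_pos % 255) h0 h1
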